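-- pv_equiv track=rewrite | github.com/alvaro-crespo/advent-of-code | 2025/day06/solution_day06.py | part_2
-- ===== SOURCE A (Python) =====
-- from math import prod
--
-- def part_2(raw_lines: list[str]) -> int:
--
--     height = len(raw_lines)
--     width = max(len(line) for line in raw_lines)
--
--     # Build column strings from top to bottom
--     col_strings = []
--     for c in range(width):
--         col = []
--         for r in range(height):
--             line = raw_lines[r]
--             col.append(line[c] if c < len(line) else " ")  # missing ch as spaces
--         col_strings.append("".join(col))
--
--     def parse_number_from_column(col: str) -> int | None:
--         # Parse digits top-to-bottom; ignore spaces.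
--         digits = [ch for ch in col if ch.isdigit()]
--         return int("".join(digits)) if digits else None
--
--     total = 0
--     i = width - 1  # start at rightmost column
--
--     while i >= 0:
--         # Skip separation columns with all spaces
--         if col_strings[i].strip() == "":
--             i -= 1
--             continue
--
--         # Collect one problem, one vertical line of the column string
--         block = []
--         while i >= 0 and col_strings[i].strip() != "":
--             block.append(col_strings[i])
--             i -= 1
--
--         # Compute result per problem
--         op = None
--         nums = []
--         for col in block:
--             bottom = col[-1]
--             if bottom in {"+", "*"}:
--                 op = bottom
--                 n = parse_number_from_column(col[:-1])  # exclude operator from digits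
--                 nums.append(n)
--             else:
--                 n = parse_number_from_column(col)
--                 nums.append(n)
--         if op == "+":
--             res_col = sum(nums)
--         else:
--             res_col = prod(nums)
--         total += res_col
--
--     return total
-- ===== SOURCE B (Python) =====
-- def part_2(raw_lines: list[str]) -> int:
--     # Single left-to-right streaming pass: per column keep a running sum and
--     # running product plus the first operator seen; a blank column (and one
--     # sentinel column past the right edge) flushes the current block into the
--     # total.  No column strings, no transposed grid, no block lists.
--     width = max(map(len, raw_lines))
--     total = 0
--     op, s, p, in_block = None, 0, 1, False
--     for c in range(width + 1):  # c == width is an all-space sentinel flushing the last block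
--         digits = []
--         blank = True
--         bottom = ' '
--         for line in raw_lines:
--             ch = line[c] if c < len(line) else ' '
--             if not ch.isspace():
--                 blank = False
--             if ch.isdigit():
--                 digits.append(ch)
--             bottom = ch
--         if blank:
--             if in_block:
--                 total += s if op == '+' else p
--             op, s, p, in_block = None, 0, 1, False
--         else:
--             if op is None and bottom in '+*':
--                 op = bottom
--             n = int(''.join(digits))
--             s += n
--             p *= n
--             in_block = True
--     return total
-- ===== Notes on version B (the rewrite author's own statement) =====
-- stated objective: alternative
-- what changed: Replaces A's materialize-columns-then-scan-blocks-right-to-left design (column strings list, per-block column list, op/nums accumulation then sum()/prod()) with a single left-to-right streaming pass keeping only constant state (running sum, running product, first operator, in-block flag) that flushes on blank columns and one sentinel column; no column strings, transposed grid or block lists are built. A raises on empty input (ValueError from max) and on grids with a digit-less non-separator column (TypeError from sum/prod over None); …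
import Mathlib
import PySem

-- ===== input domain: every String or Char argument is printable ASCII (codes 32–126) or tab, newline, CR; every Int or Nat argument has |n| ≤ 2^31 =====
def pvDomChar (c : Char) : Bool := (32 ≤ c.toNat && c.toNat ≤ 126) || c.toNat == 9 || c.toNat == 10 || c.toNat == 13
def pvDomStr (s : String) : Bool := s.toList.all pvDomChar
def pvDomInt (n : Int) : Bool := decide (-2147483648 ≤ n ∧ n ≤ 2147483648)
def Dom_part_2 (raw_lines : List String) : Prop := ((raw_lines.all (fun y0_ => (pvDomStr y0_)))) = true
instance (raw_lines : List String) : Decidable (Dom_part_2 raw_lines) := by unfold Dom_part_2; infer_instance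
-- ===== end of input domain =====

-- B replaces A's materialize-columns-then-scan-blocks-right-to-left design with one
-- left-to-right streaming pass keeping only constant state (running sum, running
-- product, first operator, in-block flag), flushed by blank columns and a sentinel.

-- ===== PORT A =====
-- col.strip() == ""  (separator column of spaces)
def pvSepA (col : List Char) : Bool := PySem.Chars.strip col == []

-- parse_number_from_column: digits top-to-bottom; None if there are no digits.
-- int("".join(digits)) always succeeds in Python here (digits nonempty, all '0'-'9').
def pvParseNumA (col : List Char) : Option Int :=
  let digits := col.filter PySem.Chars.isdigit
  if digits = [] then none else PySem.Int.ofChars? digits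

-- the per-problem reduction: one pass accumulating (op, nums), then sum or prod.
-- Python raises TypeError if a None is summed/multiplied — excluded by Pre_; the
-- '.getD 0' totalization is unreachable under Pre_.
def pvBlockA (block : List (List Char)) : Int :=
  let st := block.foldl
    (fun (s : Option Char × List (Option Int)) col =>
      let bottom := PySem.List.pyGetD col (-1) ' '      -- col[-1]
      if bottom == '+' || bottom == '*' then
        (some bottom, s.2 ++ [pvParseNumA (PySem.List.slice col none (some (-1)))])  -- col[:-1]
      else
        (s.1, s.2 ++ [pvParseNumA col]))
    (none, [])
  if st.1 == some '+' then st.2.foldl (fun a n => a + n.getD 0) 0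
  else st.2.foldl (fun a n => a * n.getD 0) 1

-- the while-loop scanning i from width-1 down to 0, as structural recursion over the
-- reversed column list: skip separator columns, span off one block, recurse on the rest.
def pvLoopA : List (List Char) → Int
  | [] => 0
  | c :: rest =>
    if pvSepA c then pvLoopA rest
    else pvBlockA (c :: rest.takeWhile (fun col => !pvSepA col))
         + pvLoopA (rest.dropWhile (fun col => !pvSepA col))
termination_by l => l.length
decreasing_by
  all_goals have h := List.length_dropWhile_le (fun col => !pvSepA col) rest
  all_goals (simp; try omega)

def part_2 (raw_lines : List String) : Int :=
  let lines := raw_lines.map String.toList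
  let height := raw_lines.length
  -- max(len(line) for line in raw_lines): ValueError on [] — excluded by Pre_
  let width := (raw_lines.map (fun l => l.toList.length)).foldl max 0
  let col_strings := (List.range width).foldl (fun acc c =>
    acc ++ [(List.range height).foldl (fun col r =>
      let line := lines.getD r []                      -- raw_lines[r]
      col ++ [if c < line.length then line.getD c ' ' else ' ']) []]) []
  pvLoopA col_strings.reverse

-- ===== PORT B =====
-- the inner row loop of Source B: per column c, collect the digit characters, the
-- all-whitespace flag and the bottom character in one pass over the lines.
-- line[c] is in range when c < len(line), so List.getD is exact there.
def pvColScanB (lines : List (List Char)) (c : Nat) : List Char × Bool × Char :=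
  lines.foldl
    (fun (st : List Char × Bool × Char) line =>
      let ch := if c < line.length then line.getD c ' ' else ' '
      ((if PySem.Chars.isdigit ch then st.1 ++ [ch] else st.1),
       (if !PySem.Chars.isspace ch then false else st.2.1),
       ch))
    ([], true, ' ')

-- the body of Source B's column loop on state (total, op, s, p, in_block):
-- a blank column flushes the current block (sum if op == '+', else product) and
-- resets; otherwise the first operator is remembered and the column's number is
-- added to the running sum and multiplied into the running product.
-- int("".join(digits)) always succeeds (digits all '0'-'9'); '.getD 0' totalizes.
def pvStepB (st : Int × Option Char × Int × Int × Bool)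
    (col3 : List Char × Bool × Char) : Int × Option Char × Int × Int × Bool :=
  match st, col3 with
  | (total, op, s, p, inb), (digits, blank, bottom) =>
    if blank then
      ((if inb then total + (if op == some '+' then s else p) else total),
       none, 0, 1, false)
    else
      let n : Int := (PySem.Int.ofChars? digits).getD 0
      (total,
       (if op == none && (bottom == '+' || bottom == '*') then some bottom else op),
       s + n, p * n, true)

def part_2_alt (raw_lines : List String) : Int :=
  let lines := raw_lines.map String.toList
  -- max(map(len, raw_lines)): ValueError on [] — totalized, outside Pre_
  let width := (raw_lines.map (fun l => l.toList.length)).foldl max 0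
  ((List.range (width + 1)).foldl
    (fun st c => pvStepB st (pvColScanB lines c)) (0, none, 0, 1, false)).1

-- ===== PRECONDITION & SPEC =====
-- Pre_ excludes exactly the inputs on which A raises: the empty list (max() of an empty
-- sequence, ValueError) and grids where some non-separator column has no digit in its
-- number part (parse_number_from_column gives None and sum/prod raise TypeError).
def Pre_part_2 (raw_lines : List String) : Prop :=
  raw_lines ≠ [] ∧
  ∀ c ∈ List.range ((raw_lines.map (fun l => l.toList.length)).foldl max 0),
    PySem.Chars.strip (raw_lines.map (fun l => l.toList.getD c ' ')) ≠ [] →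
    ((if PySem.List.pyGetD (raw_lines.map (fun l => l.toList.getD c ' ')) (-1) ' ' == '+'
        || PySem.List.pyGetD (raw_lines.map (fun l => l.toList.getD c ' ')) (-1) ' ' == '*'
      then (raw_lines.map (fun l => l.toList.getD c ' ')).dropLast
      else raw_lines.map (fun l => l.toList.getD c ' ')).filter PySem.Chars.isdigit) ≠ []
instance (raw_lines : List String) : Decidable (Pre_part_2 raw_lines) := by unfold Pre_part_2; infer_instance

def pvWitness_part_2 : List String := ["175", "+34", " *2"]

def Spec_part_2 (raw_lines : List String) (out : Int) : Prop := out = part_2_alt raw_lines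
instance (raw_lines : List String) (out : Int) : Decidable (Spec_part_2 raw_lines out) := by unfold Spec_part_2; infer_instance

-- ===== CLAIM (what is proved, stated in full; the proofs are below) =====
def Claim_equal_part_2 : Prop := ∀ (raw_lines : List String), Dom_part_2 raw_lines → Pre_part_2 raw_lines → Spec_part_2 raw_lines (part_2 raw_lines)

-- ===== LEMMAS AND PROOFS =====

-- proof-side vocabulary: the column/block decomposition both ports compute
def pvSepB (col : List Char) : Bool := PySem.Chars.strip col == []

def pvIsOpB (col : List Char) : Bool :=
  PySem.List.pyGetD col (-1) ' ' == '+' || PySem.List.pyGetD col (-1) ' ' == '*'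

def pvNumB (col : List Char) : Int :=
  (PySem.Int.ofChars? ((if pvIsOpB col then col.dropLast else col).filter PySem.Chars.isdigit)).getD 0

def pvBlockB (block : List (List Char)) : Int :=
  let op : Option Char := (block.find? pvIsOpB).map (fun col => PySem.List.pyGetD col (-1) ' ')
  let nums := block.map pvNumB
  if op == some '+' then nums.sum else nums.prod

def pvBlocksB : List (List Char) → List (List (List Char))
  | [] => []
  | c :: rest =>
    if pvSepB c then pvBlocksB rest
    else (c :: rest.takeWhile (fun col => !pvSepB col))
         :: pvBlocksB (rest.dropWhile (fun col => !pvSepB col))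
termination_by l => l.length
decreasing_by
  all_goals have h := List.length_dropWhile_le (fun col => !pvSepB col) rest
  all_goals (simp; try omega)

def pvColsB (lines : List (List Char)) : List (List Char) :=
  (List.range ((lines.map List.length).foldl max 0)).map (fun c => lines.map (fun l => l.getD c ' '))

-- B-side per-column summary
def pvSumm (col : List Char) : List Char × Bool × Char :=
  (col.filter PySem.Chars.isdigit, col.all PySem.Chars.isspace, col.getLast?.getD ' ')

theorem pvSep_eq : pvSepA = pvSepB := rfl

theorem pvBlocksB_cons_sep (y : List Char) (t : List (List Char)) (hy : pvSepB y = true) :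
    pvBlocksB (y :: t) = pvBlocksB t := by
  simp only [pvBlocksB, hy, if_true]

theorem pvLoopA_cons_sep (y : List Char) (t : List (List Char)) (hy : pvSepB y = true) :
    pvLoopA (y :: t) = pvLoopA t := by
  simp only [pvLoopA, pvSep_eq, hy, if_true]

theorem pvLoopA_cons_nonsep (y : List Char) (t : List (List Char)) (hy : pvSepB y = false) :
    pvLoopA (y :: t) = pvBlockA (y :: t.takeWhile (fun col => !pvSepB col))
      + pvLoopA (t.dropWhile (fun col => !pvSepB col)) := by
  simp only [pvLoopA, pvSep_eq, hy, Bool.false_eq_true, if_false]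

theorem pvBlocksB_cons_nonsep (y : List Char) (t : List (List Char)) (hy : pvSepB y = false) :
    pvBlocksB (y :: t) = (y :: t.takeWhile (fun col => !pvSepB col))
      :: pvBlocksB (t.dropWhile (fun col => !pvSepB col)) := by
  simp only [pvBlocksB, hy, Bool.false_eq_true, if_false]

-- a nonempty run of non-separator columns is a single block
theorem pvBlocksB_run (r : List (List Char)) (hr : r ≠ [])
    (hall : ∀ y ∈ r, pvSepB y = false) : pvBlocksB r = [r] := by
  match r, hr with
  | c :: r', _ =>
    have hc : pvSepB c = false := hall c (by simp)
    have h1 : r'.takeWhile (fun col => !pvSepB col) = r' :=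
      List.takeWhile_eq_self_iff.mpr (fun x hx => by
        simp [hall x (List.mem_cons_of_mem _ hx)])
    have h2 : r'.dropWhile (fun col => !pvSepB col) = [] :=
      List.dropWhile_eq_nil_iff.mpr (fun x hx => by
        simp [hall x (List.mem_cons_of_mem _ hx)])
    simp only [pvBlocksB, hc, Bool.false_eq_true, if_false, h1, h2]

-- appending a separator column on the right does not change the blocks
theorem pvBlocksB_append_sep (x : List Char) (hx : pvSepB x = true) :
    ∀ n (m : List (List Char)), m.length ≤ n → pvBlocksB (m ++ [x]) = pvBlocksB m := by
  intro n
  induction n with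
  | zero =>
    intro m hm
    have hmn : m = [] := List.eq_nil_of_length_eq_zero (Nat.le_zero.mp hm)
    subst hmn
    simp [pvBlocksB, hx]
  | succ n ih =>
    intro m hm
    match m with
    | [] => simp [pvBlocksB, hx]
    | y :: t =>
      have htn : t.length ≤ n := by simpa using hm
      by_cases hy : pvSepB y = true
      · simp only [List.cons_append, pvBlocksB, hy, if_true]
        exact ih t htn
      · simp only [List.cons_append, pvBlocksB, hy, Bool.false_eq_true, if_false]
        rw [List.takeWhile_append, List.dropWhile_append]
        by_cases hall : ∀ z ∈ t, (!pvSepB z) = true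
        · have ht : t.takeWhile (fun col => !pvSepB col) = t := List.takeWhile_eq_self_iff.mpr hall
          have hd : t.dropWhile (fun col => !pvSepB col) = [] := List.dropWhile_eq_nil_iff.mpr hall
          rw [ht, hd]
          simp [pvBlocksB, hx]
        · have hd : t.dropWhile (fun col => !pvSepB col) ≠ [] := by
            rw [Ne, List.dropWhile_eq_nil_iff]; exact hall
          have hlen : ¬ (t.takeWhile (fun col => !pvSepB col)).length = t.length := by
            intro hl
            exact hall (List.takeWhile_eq_self_iff.mp
              ((List.takeWhile_prefix _).eq_of_length hl))
          rw [if_neg hlen, if_neg (by simpa [List.isEmpty_iff] using hd)]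
          rw [ih (t.dropWhile (fun col => !pvSepB col))
            (le_trans (List.length_dropWhile_le _ _) htn)]

-- appending a nonempty non-separator run after a list ending in a separator appends one block
theorem pvBlocksB_append_run (r : List (List Char)) (hr : r ≠ [])
    (hall : ∀ y ∈ r, pvSepB y = false) :
    ∀ n (m : List (List Char)), m.length ≤ n →
      (∀ w, m.getLast? = some w → pvSepB w = true) →
      pvBlocksB (m ++ r) = pvBlocksB m ++ [r] := by
  intro n
  induction n with
  | zero =>
    intro m hm _
    have hmn : m = [] := List.eq_nil_of_length_eq_zero (Nat.le_zero.mp hm)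
    subst hmn
    rw [List.nil_append, pvBlocksB_run r hr hall]; simp [pvBlocksB]
  | succ n ih =>
    intro m hm hlast
    match m with
    | [] => rw [List.nil_append, pvBlocksB_run r hr hall]; simp [pvBlocksB]
    | y :: t =>
      have htn : t.length ≤ n := by simpa using hm
      by_cases hy : pvSepB y = true
      · cases t with
        | nil =>
          rw [show [y] ++ r = y :: r from rfl]
          rw [pvBlocksB_cons_sep y r hy, pvBlocksB_cons_sep y [] hy]
          rw [pvBlocksB_run r hr hall]
          simp [pvBlocksB]
        | cons z t' =>
          have hlast' : ∀ w, (z :: t').getLast? = some w → pvSepB w = true := by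
            intro w hw; exact hlast w (by simpa using hw)
          rw [show (y :: z :: t') ++ r = y :: ((z :: t') ++ r) from rfl]
          rw [pvBlocksB_cons_sep y ((z :: t') ++ r) hy, pvBlocksB_cons_sep y (z :: t') hy]
          exact ih (z :: t') htn hlast'
      · cases t with
        | nil => exact absurd (hlast y (by simp)) hy
        | cons z t' =>
          have hlast' : ∀ w, (z :: t').getLast? = some w → pvSepB w = true := by
            intro w hw; exact hlast w (by simpa using hw)
          obtain ⟨w0, hw0⟩ : ∃ w, (z :: t').getLast? = some w := by
            cases hgl : (z :: t').getLast? with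
            | none => exact absurd hgl (by simp)
            | some w => exact ⟨w, rfl⟩
          have hw0sep : pvSepB w0 = true := hlast' w0 hw0
          have hw0mem : w0 ∈ z :: t' := List.mem_of_getLast? hw0
          have hd : (z :: t').dropWhile (fun col => !pvSepB col) ≠ [] := by
            rw [Ne, List.dropWhile_eq_nil_iff]
            intro hq; have := hq w0 hw0mem; simp [hw0sep] at this
          have hlen : ¬ ((z :: t').takeWhile (fun col => !pvSepB col)).length = (z :: t').length := by
            intro hl
            have := List.takeWhile_eq_self_iff.mp
              ((List.takeWhile_prefix _).eq_of_length hl) w0 hw0mem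
            simp [hw0sep] at this
          have hlastd : ∀ w, ((z :: t').dropWhile (fun col => !pvSepB col)).getLast? = some w →
              pvSepB w = true := by
            intro w hw
            obtain ⟨pre, hpre⟩ := List.dropWhile_suffix (l := z :: t') (fun col => !pvSepB col)
            apply hlast'
            rw [← hpre, List.getLast?_append_of_ne_nil _ hd, hw]
          rw [show (y :: z :: t') ++ r = y :: ((z :: t') ++ r) from rfl]
          rw [pvBlocksB_cons_nonsep y ((z :: t') ++ r) (by simpa using hy),
            pvBlocksB_cons_nonsep y (z :: t') (by simpa using hy)]
          rw [List.takeWhile_append, List.dropWhile_append,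
            if_neg hlen, if_neg (by simpa [List.isEmpty_iff] using hd)]
          rw [ih ((z :: t').dropWhile (fun col => !pvSepB col))
            (le_trans (List.length_dropWhile_le _ _) htn) hlastd]
          rfl

-- A's operator accumulator (last write wins, scanning the reversed block) is the
-- first operator column of the block
theorem pvOpFold (l : List (List Char)) (init : Option Char) :
    l.foldl (fun o col => if pvIsOpB col then some (PySem.List.pyGetD col (-1) ' ') else o) init
    = match l.reverse.find? pvIsOpB with
      | some c => some (PySem.List.pyGetD c (-1) ' ')
      | none => init := by
  induction l generalizing init with
  | nil => rfl
  | cons c t ih =>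
    simp only [List.foldl_cons, ih, List.reverse_cons, List.find?_append]
    cases hf : t.reverse.find? pvIsOpB with
    | some c' => simp
    | none =>
      by_cases hc : pvIsOpB c = true <;> simp [List.find?, hc]

theorem pvParse_getD (l : List Char) :
    (pvParseNumA l).getD 0 = (PySem.Int.ofChars? (l.filter PySem.Chars.isdigit)).getD 0 := by
  have h0 : PySem.Int.ofChars? ([] : List Char) = none := rfl
  by_cases h : l.filter PySem.Chars.isdigit = [] <;> simp [pvParseNumA, h, h0]

theorem foldl_mul_getD (l : List (Option Int)) (a : Int) :
    l.foldl (fun x n => x * n.getD 0) a = a * (l.map (fun n => n.getD 0)).prod := by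
  induction l generalizing a with
  | nil => simp
  | cons c t ih => simp [ih, mul_assoc]

-- A's one-pass (op, nums) fold on the reversed block equals the find?/map reduction
theorem pvBlock_eq (b : List (List Char)) : pvBlockA b.reverse = pvBlockB b := by
  unfold pvBlockA pvBlockB
  have hstep : (fun (s : Option Char × List (Option Int)) col =>
      let bottom := PySem.List.pyGetD col (-1) ' '
      if bottom == '+' || bottom == '*' then
        (some bottom, s.2 ++ [pvParseNumA (PySem.List.slice col none (some (-1)))])
      else (s.1, s.2 ++ [pvParseNumA col]))
      = (fun (s : Option Char × List (Option Int)) col =>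
        ((fun o c => if pvIsOpB c then some (PySem.List.pyGetD c (-1) ' ') else o) s.1 col,
         (fun ns c => ns ++ [pvParseNumA (if pvIsOpB c then c.dropLast else c)]) s.2 col)) := by
    funext s col
    simp only [pvIsOpB, PySem.List.slice_to_neg_one]
    by_cases h : (PySem.List.pyGetD col (-1) ' ' == '+'
        || PySem.List.pyGetD col (-1) ' ' == '*') = true <;> simp [h]
  rw [hstep, PySem.List.foldl_prod_mk
    (f := fun o c => if pvIsOpB c then some (PySem.List.pyGetD c (-1) ' ') else o)
    (g := fun ns c => ns ++ [pvParseNumA (if pvIsOpB c then c.dropLast else c)])]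
  rw [pvOpFold, PySem.List.foldl_append_singleton_eq_map]
  simp only [List.reverse_reverse, List.nil_append]
  have hmatch : (match b.find? pvIsOpB with
      | some c => some (PySem.List.pyGetD c (-1) ' ') | none => (none : Option Char))
      = (b.find? pvIsOpB).map (fun col => PySem.List.pyGetD col (-1) ' ') := by
    cases b.find? pvIsOpB <;> rfl
  rw [hmatch]
  have hnum : ∀ col : List Char,
      (pvParseNumA (if pvIsOpB col then col.dropLast else col)).getD 0 = pvNumB col := by
    intro col; rw [pvParse_getD]; rfl
  by_cases hop : ((b.find? pvIsOpB).map (fun col => PySem.List.pyGetD col (-1) ' ')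
      == some '+') = true
  · rw [if_pos hop, if_pos hop]
    rw [PySem.List.foldl_add _ (fun n : Option Int => n.getD 0) 0]
    simp only [zero_add, List.map_reverse, List.sum_reverse, List.map_map]
    exact congrArg List.sum (List.map_congr_left (fun col _ => hnum col))
  · rw [if_neg hop, if_neg hop]
    rw [foldl_mul_getD]
    simp only [one_mul, List.map_reverse, List.prod_reverse, List.map_map]
    exact congrArg List.prod (List.map_congr_left (fun col _ => hnum col))

-- the scanning loop over the reversed columns computes the sum of the block values
theorem pvLoopA_eq : ∀ n (l : List (List Char)), l.length ≤ n →
    pvLoopA l.reverse = ((pvBlocksB l).map pvBlockB).sum := by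
  intro n
  induction n with
  | zero =>
    intro l hl
    have hln : l = [] := List.eq_nil_of_length_eq_zero (Nat.le_zero.mp hl)
    subst hln
    simp [pvLoopA, pvBlocksB]
  | succ n ih =>
    intro l hl
    cases hrev : l.reverse with
    | nil =>
      have hln : l = [] := List.reverse_eq_nil_iff.mp hrev
      subst hln
      simp [pvLoopA, pvBlocksB]
    | cons x r =>
      have hlr : l = r.reverse ++ [x] := by
        rw [← List.reverse_reverse l, hrev]; simp
      have hr_len : r.length ≤ n := by
        have := congrArg List.length hrev
        simp at this; omega
      by_cases hx : pvSepB x = true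
      · rw [pvLoopA_cons_sep x r hx]
        rw [hlr, pvBlocksB_append_sep x hx r.reverse.length r.reverse le_rfl]
        have := ih r.reverse (by simpa using hr_len)
        rwa [List.reverse_reverse] at this
      · rw [pvLoopA_cons_nonsep x r (by simpa using hx)]
        have htk : r.takeWhile (fun col => !pvSepB col)
            = (r.reverse.rtakeWhile (fun col => !pvSepB col)).reverse := by
          unfold List.rtakeWhile; rw [List.reverse_reverse, List.reverse_reverse]
        have hdw : r.dropWhile (fun col => !pvSepB col)
            = (r.reverse.rdropWhile (fun col => !pvSepB col)).reverse := by
          unfold List.rdropWhile; rw [List.reverse_reverse, List.reverse_reverse]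
        rw [htk, hdw]
        rw [show x :: (r.reverse.rtakeWhile (fun col => !pvSepB col)).reverse
            = (r.reverse.rtakeWhile (fun col => !pvSepB col) ++ [x]).reverse by simp]
        rw [pvBlock_eq]
        have hdlen : (r.reverse.rdropWhile (fun col => !pvSepB col)).length ≤ n :=
          le_trans (by simpa using (List.rdropWhile_prefix (fun col => !pvSepB col) r.reverse).length_le) hr_len
        rw [ih _ hdlen]
        have hallr : ∀ y ∈ r.reverse.rtakeWhile (fun col => !pvSepB col) ++ [x],
            pvSepB y = false := by
          intro y hy
          rcases List.mem_append.mp hy with hy | hy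
          · have := List.mem_rtakeWhile_imp hy; simpa using this
          · simp at hy; subst hy; simpa using hx
        have hcond : ∀ w, (r.reverse.rdropWhile (fun col => !pvSepB col)).getLast? = some w →
            pvSepB w = true := by
          intro w hw
          have hnil : r.reverse.rdropWhile (fun col => !pvSepB col) ≠ [] := by
            intro h; rw [h] at hw; simp at hw
          have hnot := List.rdropWhile_last_not (fun col => !pvSepB col) r.reverse hnil
          have hgl : (r.reverse.rdropWhile (fun col => !pvSepB col)).getLast hnil = w := by
            have := List.getLast?_eq_some_getLast hnil
            rw [this] at hw; exact Option.some.inj hw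
          rw [hgl] at hnot; simpa using hnot
        rw [hlr]
        rw [show r.reverse ++ [x]
            = r.reverse.rdropWhile (fun col => !pvSepB col)
              ++ (r.reverse.rtakeWhile (fun col => !pvSepB col) ++ [x]) by
          rw [← List.append_assoc, List.rdropWhile_append_rtakeWhile]]
        rw [pvBlocksB_append_run _ (by simp) hallr
          (r.reverse.rdropWhile (fun col => !pvSepB col)).length _ le_rfl hcond]
        rw [List.map_append, List.sum_append]
        simp only [List.map_cons, List.map_nil, List.sum_cons, List.sum_nil, add_zero]
        omega

-- (range l.length).map (fun r => f (l.getD r d)) is just l.map f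
theorem map_range_getD {α β : Type} (l : List α) (d : α) (f : α → β) :
    (List.range l.length).map (fun r => f (l.getD r d)) = l.map f := by
  apply List.ext_getElem
  · simp
  · intro i h1 h2
    simp only [List.getElem_map, List.getElem_range]
    rw [List.getD_eq_getElem l d (by simpa using h2)]

-- A's hand-built column strings are the pvColsB columns
theorem pvCols_eq (raw_lines : List String) :
    (List.range ((raw_lines.map (fun l => l.toList.length)).foldl max 0)).foldl (fun acc c =>
      acc ++ [(List.range raw_lines.length).foldl (fun col r =>
        col ++ [if c < ((raw_lines.map String.toList).getD r []).length
                then ((raw_lines.map String.toList).getD r []).getD c ' ' else ' ']) []]) []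
    = pvColsB (raw_lines.map String.toList) := by
  rw [PySem.List.foldl_append_singleton_eq_map, List.nil_append]
  unfold pvColsB
  rw [show ((raw_lines.map String.toList).map List.length).foldl max 0
      = (raw_lines.map (fun l => l.toList.length)).foldl max 0 by rw [List.map_map]; rfl]
  apply List.map_congr_left
  intro c _
  rw [PySem.List.foldl_append_singleton_eq_map, List.nil_append]
  rw [show (List.range raw_lines.length)
      = (List.range (raw_lines.map String.toList).length) by simp]
  rw [map_range_getD (raw_lines.map String.toList) []
    (fun line => if c < line.length then line.getD c ' ' else ' ')]
  apply List.map_congr_left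
  intro line _
  by_cases h : c < line.length
  · rw [if_pos h]
  · rw [if_neg h, List.getD_eq_default line ' ' (le_of_not_gt h)]

-- ===== B-side lemmas: the streaming pass computes the same block sum =====

def pvNumFull (col : List Char) : Int :=
  (PySem.Int.ofChars? (col.filter PySem.Chars.isdigit)).getD 0

def pvOpFirst (b : List (List Char)) : Option Char :=
  (b.find? pvIsOpB).map (fun col => col.getLast?.getD ' ')

theorem strip_eq_nil_iff (s : List Char) :
    PySem.Chars.strip s = [] ↔ s.all PySem.Chars.isspace = true := by
  unfold PySem.Chars.strip PySem.Chars.rstrip PySem.Chars.lstrip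
  rw [List.reverse_eq_nil_iff, List.dropWhile_eq_nil_iff, List.all_eq_true]
  constructor
  · intro h x hx
    rw [← List.takeWhile_append_dropWhile (p := PySem.Chars.isspace) (l := s)] at hx
    rcases List.mem_append.mp hx with hx | hx
    · exact List.mem_takeWhile_imp hx
    · exact h x (List.mem_reverse.mpr hx)
  · intro h x hx
    exact h x ((List.dropWhile_suffix _).subset (List.mem_reverse.mp hx))

theorem pvSepB_eq_all (col : List Char) : pvSepB col = col.all PySem.Chars.isspace := by
  unfold pvSepB
  cases hall : col.all PySem.Chars.isspace with
  | false =>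
    refine beq_eq_false_iff_ne.mpr (fun hh => ?_)
    rw [(strip_eq_nil_iff col).mp hh] at hall
    cases hall
  | true => exact beq_iff_eq.mpr ((strip_eq_nil_iff col).mpr hall)

theorem pyGetD_neg_one_getD (xs : List Char) (d : Char) :
    PySem.List.pyGetD xs (-1) d = xs.getLast?.getD d := by
  simp [PySem.List.pyGetD, PySem.List.pyGet?_neg_one]

theorem pvIsOpB_last (col : List Char) :
    pvIsOpB col = (col.getLast?.getD ' ' == '+' || col.getLast?.getD ' ' == '*') := by
  unfold pvIsOpB
  rw [pyGetD_neg_one_getD]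

theorem pvNumB_full (col : List Char) : pvNumB col = pvNumFull col := by
  unfold pvNumB pvNumFull
  by_cases h : pvIsOpB col = true
  · have hne : col ≠ [] := by
      intro hc; subst hc
      exact absurd h (by decide)
    have hlast : ¬ PySem.Chars.isdigit (col.getLast hne) = true := by
      have h2 := pvIsOpB_last col
      rw [h, List.getLast?_eq_some_getLast hne] at h2
      rcases Bool.or_eq_true_iff.mp h2.symm with h3 | h3
      · rw [show col.getLast hne = '+' by simpa using (beq_iff_eq.mp h3)]; decide
      · rw [show col.getLast hne = '*' by simpa using (beq_iff_eq.mp h3)]; decide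
    rw [if_pos h]
    congr 2
    conv_rhs => rw [← List.dropLast_append_getLast hne]
    rw [List.filter_append]
    simp [hlast]
  · rw [if_neg h]

-- the inner row loop computes (digit chars, all-space flag, last char) of the column
theorem foldl_blank (l : List Char) : ∀ b : Bool,
    l.foldl (fun b ch => if !PySem.Chars.isspace ch then false else b) b
      = (b && l.all PySem.Chars.isspace) := by
  induction l with
  | nil => intro b; simp
  | cons c t ih =>
    intro b
    have hstep : (if !PySem.Chars.isspace c then false else b) = (b && PySem.Chars.isspace c) := by
      cases PySem.Chars.isspace c <;> simp
    simp only [List.foldl_cons, hstep, ih, List.all_cons]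
    cases b <;> cases PySem.Chars.isspace c <;> simp

theorem foldl_last {α : Type} (l : List α) : ∀ d : α,
    l.foldl (fun _ x => x) d = l.getLast?.getD d := by
  induction l with
  | nil => intro d; simp
  | cons c t ih =>
    intro d
    simp only [List.foldl_cons, ih]
    cases t with
    | nil => simp
    | cons c2 t2 =>
      rw [List.getLast?_cons_cons]
      cases hg : (c2 :: t2).getLast? with
      | none => simp at hg
      | some y => rfl

theorem foldl_comp {A B S : Type} (g : A → B) (f : S → B → S) (l : List A) (init : S) :
    l.foldl (fun s a => f s (g a)) init = (l.map g).foldl f init :=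
  (List.foldl_map).symm

theorem pvColScanB_eq (lines : List (List Char)) (c : Nat) :
    pvColScanB lines c = pvSumm (lines.map (fun l => l.getD c ' ')) := by
  unfold pvColScanB pvSumm
  have hstep : (fun (st : List Char × Bool × Char) (line : List Char) =>
      let ch := if c < line.length then line.getD c ' ' else ' '
      ((if PySem.Chars.isdigit ch then st.1 ++ [ch] else st.1),
       (if !PySem.Chars.isspace ch then false else st.2.1),
       ch))
      = (fun (st : List Char × Bool × Char) (line : List Char) =>
        ((fun (acc : List Char) (l : List Char) =>
            if PySem.Chars.isdigit (l.getD c ' ') then acc ++ [l.getD c ' '] else acc) st.1 line,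
         (fun (bc : Bool × Char) (l : List Char) =>
            ((if !PySem.Chars.isspace (l.getD c ' ') then false else bc.1), l.getD c ' ')) st.2 line)) := by
    funext st line
    by_cases h : c < line.length
    · simp [h]
    · simp [h]
  rw [hstep, PySem.List.foldl_prod_mk
    (f := fun (acc : List Char) (l : List Char) =>
      if PySem.Chars.isdigit (l.getD c ' ') then acc ++ [l.getD c ' '] else acc)
    (g := fun (bc : Bool × Char) (l : List Char) =>
      ((if !PySem.Chars.isspace (l.getD c ' ') then false else bc.1), l.getD c ' '))]
  rw [PySem.List.foldl_prod_mk
    (f := fun (b : Bool) (l : List Char) => if !PySem.Chars.isspace (l.getD c ' ') then false else b)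
    (g := fun (_ : Char) (l : List Char) => l.getD c ' ')]
  refine congrArg₂ Prod.mk ?_ (congrArg₂ Prod.mk ?_ ?_)
  · rw [foldl_comp (fun l : List Char => l.getD c ' ')
      (fun acc ch => if PySem.Chars.isdigit ch then acc ++ [ch] else acc) lines []]
    rw [PySem.List.foldl_append_if_eq_filter]
    rfl
  · rw [foldl_comp (fun l : List Char => l.getD c ' ')
      (fun b ch => if !PySem.Chars.isspace ch then false else b) lines true]
    rw [foldl_blank]
    simp
  · rw [foldl_comp (fun l : List Char => l.getD c ' ') (fun _ x => x) lines ' ']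
    rw [foldl_last]

-- a run of non-separator columns accumulates sum, product and first operator
theorem pvRunB (r : List (List Char)) (hall : ∀ y ∈ r, pvSepB y = false) :
    ∀ (T : Int) (op : Option Char) (s p : Int) (b : Bool),
    (r.map pvSumm).foldl pvStepB (T, op, s, p, b)
      = (T, (if op == none then pvOpFirst r else op),
         s + (r.map pvNumFull).sum, p * (r.map pvNumFull).prod, (b || !r.isEmpty)) := by
  induction r with
  | nil =>
    intro T op s p b
    cases op <;> simp [pvOpFirst]
  | cons c t ih =>
    intro T op s p b
    have hc : pvSepB c = false := hall c (by simp)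
    have hblank : c.all PySem.Chars.isspace = false := by rw [← pvSepB_eq_all]; exact hc
    have hn : (PySem.Int.ofChars? (c.filter PySem.Chars.isdigit)).getD 0 = pvNumFull c := rfl
    simp only [List.map_cons, List.foldl_cons, pvSumm, pvStepB, hblank, Bool.false_eq_true,
      if_false, hn]
    rw [ih (fun y hy => hall y (List.mem_cons_of_mem _ hy))]
    refine congrArg₂ Prod.mk rfl (congrArg₂ Prod.mk ?_ (congrArg₂ Prod.mk ?_
      (congrArg₂ Prod.mk ?_ ?_)))
    · cases op with
      | some o => simp
      | none =>
        simp only [beq_self_eq_true, Bool.true_and, if_true]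
        by_cases hop : pvIsOpB c = true <;>
          simp [pvOpFirst, List.find?, hop, ← pvIsOpB_last c]
    · simp only [List.sum_cons]; ring
    · simp only [List.prod_cons]; ring
    · simp

-- the full streaming fold over the columns plus the sentinel is the block sum
theorem pvStepB_flush (T : Int) (op : Option Char) (s p : Int) (dg : List Char) (bt : Char) :
    pvStepB (T, op, s, p, true) (dg, true, bt)
      = (T + (if op == some '+' then s else p), none, 0, 1, false) := by
  simp [pvStepB]

theorem pvBlocksFold : ∀ n (cs : List (List Char)), cs.length ≤ n → ∀ T : Int,
    ((cs.map pvSumm) ++ [(([] : List Char), true, ' ')]).foldl pvStepB (T, none, 0, 1, false)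
      = (T + ((pvBlocksB cs).map pvBlockB).sum, none, 0, 1, false) := by
  intro n
  induction n with
  | zero =>
    intro cs hcs T
    have : cs = [] := List.eq_nil_of_length_eq_zero (Nat.le_zero.mp hcs)
    subst this
    simp [pvStepB, pvBlocksB]
  | succ n ih =>
    intro cs hcs T
    cases cs with
    | nil => simp [pvStepB, pvBlocksB]
    | cons c rest =>
      have hrest : rest.length ≤ n := by simpa using hcs
      by_cases hsep : pvSepB c = true
      · have hblank : c.all PySem.Chars.isspace = true := by rw [← pvSepB_eq_all]; exact hsep
        simp only [List.map_cons, List.cons_append, List.foldl_cons, pvSumm, pvStepB, hblank,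
          if_true, Bool.false_eq_true, if_false]
        rw [ih rest hrest T, pvBlocksB_cons_sep c rest hsep]
      · have hcF : pvSepB c = false := by simpa using hsep
        have hsplit : rest = rest.takeWhile (fun col => !pvSepB col)
            ++ rest.dropWhile (fun col => !pvSepB col) :=
          (List.takeWhile_append_dropWhile).symm
        have hallrun : ∀ y ∈ c :: rest.takeWhile (fun col => !pvSepB col), pvSepB y = false := by
          intro y hy
          rcases List.mem_cons.mp hy with hy | hy
          · subst hy; exact hcF
          · have := List.mem_takeWhile_imp hy; simpa using this
        have hblockval : (if (if (none : Option Char) == none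
              then pvOpFirst (c :: rest.takeWhile (fun col => !pvSepB col))
              else none) == some '+'
            then (0 : Int) + (((c :: rest.takeWhile (fun col => !pvSepB col)).map pvNumFull).sum)
            else (1 : Int) * (((c :: rest.takeWhile (fun col => !pvSepB col)).map pvNumFull).prod))
            = pvBlockB (c :: rest.takeWhile (fun col => !pvSepB col)) := by
          unfold pvBlockB
          have hopeq : ((c :: rest.takeWhile (fun col => !pvSepB col)).find? pvIsOpB).map
              (fun col => PySem.List.pyGetD col (-1) ' ')
              = pvOpFirst (c :: rest.takeWhile (fun col => !pvSepB col)) := by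
            unfold pvOpFirst
            cases (c :: rest.takeWhile (fun col => !pvSepB col)).find? pvIsOpB with
            | none => rfl
            | some col => simp [pyGetD_neg_one_getD]
          have hnums : (c :: rest.takeWhile (fun col => !pvSepB col)).map pvNumB
              = (c :: rest.takeWhile (fun col => !pvSepB col)).map pvNumFull :=
            List.map_congr_left (fun col _ => pvNumB_full col)
          rw [hopeq, hnums]
          simp only [beq_self_eq_true, if_true, zero_add, one_mul]
        simp only [List.map_cons] at hblockval
        conv_lhs => rw [hsplit]
        rw [List.map_cons, List.map_append, List.cons_append, List.append_assoc,
          show ∀ (x : List Char × Bool × Char) l1 l2, x :: (l1 ++ l2) = (x :: l1) ++ l2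
            from fun _ _ _ => rfl,
          List.foldl_append,
          show (pvSumm c :: (rest.takeWhile (fun col => !pvSepB col)).map pvSumm)
            = ((c :: rest.takeWhile (fun col => !pvSepB col)).map pvSumm) from rfl,
          pvRunB _ hallrun]
        cases hdr : rest.dropWhile (fun col => !pvSepB col) with
        | nil =>
          simp only [List.map_nil, List.nil_append, List.foldl_cons, List.foldl_nil, pvStepB,
            if_true]
          rw [pvBlocksB_cons_nonsep c rest hcF, hdr]
          simp only [pvBlocksB, List.map_cons, List.map_nil, List.sum_cons, List.sum_nil,
            add_zero]
          rw [← hblockval]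
          simp
        | cons d dr =>
          have hdsep : pvSepB d = true := by
            have hne : rest.dropWhile (fun col => !pvSepB col) ≠ [] := by rw [hdr]; simp
            have h1 := List.head_dropWhile_not (fun col => !pvSepB col) hne
            have h2 : (rest.dropWhile (fun col => !pvSepB col)).head? = some d := by
              rw [hdr]; rfl
            rw [List.head?_eq_some_head hne] at h2
            rw [Option.some.inj h2] at h1
            simpa using h1
          have hdblank : d.all PySem.Chars.isspace = true := by rw [← pvSepB_eq_all]; exact hdsep
          have hdrlen : dr.length ≤ n := by
            have h1 := List.length_dropWhile_le (fun col => !pvSepB col) rest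
            rw [hdr] at h1
            simp at h1
            omega
          simp only [List.map_cons, List.cons_append, List.foldl_cons]
          rw [show (false || !(c :: rest.takeWhile (fun col => !pvSepB col)).isEmpty) = true
              by simp]
          rw [show pvSumm d = (d.filter PySem.Chars.isdigit, true, d.getLast?.getD ' ')
              by unfold pvSumm; rw [hdblank]]
          rw [pvStepB_flush, hblockval]
          rw [ih dr hdrlen]
          rw [pvBlocksB_cons_nonsep c rest hcF, hdr, pvBlocksB_cons_sep d dr hdsep]
          simp only [List.map_cons, List.sum_cons]
          refine congrArg₂ Prod.mk ?_ rfl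
          ring

theorem foldl_max_init_le : ∀ (l : List Nat) (a : Nat), a ≤ l.foldl max a := by
  intro l
  induction l with
  | nil => intro a; simp
  | cons c t ih => intro a; exact le_trans (le_max_left a c) (ih (max a c))

theorem mem_le_foldl_max : ∀ (l : List Nat) (a x : Nat), x ∈ l → x ≤ l.foldl max a := by
  intro l
  induction l with
  | nil => intro a x hx; simp at hx
  | cons c t ih =>
    intro a x hx
    rcases List.mem_cons.mp hx with hx | hx
    · subst hx
      exact le_trans (le_max_right a x) (foldl_max_init_le t (max a x))
    · exact ih (max a c) x hx

theorem pvSumm_spaces (col : List Char) (h : ∀ x ∈ col, x = ' ') :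
    pvSumm col = ([], true, ' ') := by
  unfold pvSumm
  refine congrArg₂ Prod.mk ?_ (congrArg₂ Prod.mk ?_ ?_)
  · refine List.filter_eq_nil_iff.mpr (fun x hx => ?_)
    rw [h x hx]; decide
  · refine List.all_eq_true.mpr (fun x hx => ?_)
    rw [h x hx]; decide
  · cases hc : col.getLast? with
    | none => rfl
    | some y =>
      have := h y (List.mem_of_getLast? hc)
      simp [this]

-- the streaming pass equals the block-sum characterization
theorem part_2_alt_eq (raw_lines : List String) :
    part_2_alt raw_lines
      = ((pvBlocksB (pvColsB (raw_lines.map String.toList))).map pvBlockB).sum := by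
  simp only [part_2_alt]
  have hw : (((raw_lines.map String.toList).map List.length).foldl max 0)
      = (raw_lines.map (fun l => l.toList.length)).foldl max 0 := by
    rw [List.map_map]; rfl
  have hfold : ∀ (l : List Nat) (init : Int × Option Char × Int × Int × Bool),
      l.foldl (fun st c => pvStepB st (pvColScanB (raw_lines.map String.toList) c)) init
      = (l.map (fun c => pvColScanB (raw_lines.map String.toList) c)).foldl pvStepB init := by
    intro l init
    rw [List.foldl_map]
  rw [List.range_succ, hfold, List.map_append, List.map_singleton]
  have hsent : pvColScanB (raw_lines.map String.toList)
      ((raw_lines.map (fun l => l.toList.length)).foldl max 0) = ([], true, ' ') := by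
    rw [pvColScanB_eq]
    refine pvSumm_spaces _ (fun x hx => ?_)
    rcases List.mem_map.mp hx with ⟨l, hl, hlx⟩
    have hlen : l.length ≤ (raw_lines.map (fun s => s.toList.length)).foldl max 0 := by
      rw [← hw]
      exact mem_le_foldl_max _ 0 l.length (List.mem_map_of_mem hl)
    rw [← hlx, List.getD_eq_default l ' ' hlen]
  have hcols : (List.range ((raw_lines.map (fun l => l.toList.length)).foldl max 0)).map
      (fun c => pvColScanB (raw_lines.map String.toList) c)
      = (pvColsB (raw_lines.map String.toList)).map pvSumm := by
    unfold pvColsB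
    rw [hw, List.map_map]
    exact List.map_congr_left (fun c _ => pvColScanB_eq _ c)
  rw [hsent, hcols, pvBlocksFold (pvColsB (raw_lines.map String.toList)).length _ le_rfl 0]
  simp

-- ===== VERDICT (by name: the statement is the Claim_ definition above) =====
theorem part_2_spec : Claim_equal_part_2 := by
  intro raw_lines _ _
  unfold Spec_part_2
  rw [part_2_alt_eq]
  simp only [part_2]
  rw [pvCols_eq raw_lines]
  exact pvLoopA_eq (pvColsB (raw_lines.map String.toList)).length _ le_rfl
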